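-- pv_equiv track=rewrite | github.com/AdameusWalletfold/RegistrationProject | billing.py | calculate_hours_and_bill
-- ===== SOURCE A (Python) =====
-- def calculate_hours_and_bill(id, s_in_state, c_rosters, c_hours):
--     # ------------------------------------------------------------
--     # This function calculate billing information. It takes four
--     # parameters: id, the student id; s_in_state, the list of
--     # in-state students; c_rosters, the rosters of students in
--     # each course; c_hours, the number of hours in each course.
--     # This function returns the number of course hours and tuition
--     # cost.
--     # ------------------------------------------------------------
--     hours = 0
--     cost = 0
--     for course in c_rosters:
--         if id in c_rosters[course]:
--             hours += c_hours[course]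
--             if not s_in_state.get(id):
--                 cost += c_hours[course] * 850
--             else:
--                 cost += c_hours[course] * 225
--     return hours, cost
-- ===== SOURCE B (Python) =====
-- def calculate_hours_and_bill(id, s_in_state, c_rosters, c_hours):
--     # Different decomposition: stage 1 collects the set of courses that
--     # enroll the student; stage 2 sums hours by a single pass over c_hours
--     # (membership test against that set instead of per-course dict lookups);
--     # the rate is chosen once and the bill is one multiplication.
--     enrolled = {course for course, roster in c_rosters.items() if id in roster}
--     hours = 0
--     for course, h in c_hours.items():
--         if course in enrolled:
--             hours += h
--     rate = 225 if s_in_state.get(id) else 850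
--     return hours, hours * rate
-- ===== Notes on version B (the rewrite author's own statement) =====
-- stated objective: alternative
-- what changed: B inverts the traversal: it first builds the set of courses whose roster contains the student, then computes hours in one pass over c_hours with a membership test against that set (no per-course c_hours lookups and no in-loop accumulators/branch), chooses the 225/850 rate once, and bills with a single multiplication.
import Mathlib
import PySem

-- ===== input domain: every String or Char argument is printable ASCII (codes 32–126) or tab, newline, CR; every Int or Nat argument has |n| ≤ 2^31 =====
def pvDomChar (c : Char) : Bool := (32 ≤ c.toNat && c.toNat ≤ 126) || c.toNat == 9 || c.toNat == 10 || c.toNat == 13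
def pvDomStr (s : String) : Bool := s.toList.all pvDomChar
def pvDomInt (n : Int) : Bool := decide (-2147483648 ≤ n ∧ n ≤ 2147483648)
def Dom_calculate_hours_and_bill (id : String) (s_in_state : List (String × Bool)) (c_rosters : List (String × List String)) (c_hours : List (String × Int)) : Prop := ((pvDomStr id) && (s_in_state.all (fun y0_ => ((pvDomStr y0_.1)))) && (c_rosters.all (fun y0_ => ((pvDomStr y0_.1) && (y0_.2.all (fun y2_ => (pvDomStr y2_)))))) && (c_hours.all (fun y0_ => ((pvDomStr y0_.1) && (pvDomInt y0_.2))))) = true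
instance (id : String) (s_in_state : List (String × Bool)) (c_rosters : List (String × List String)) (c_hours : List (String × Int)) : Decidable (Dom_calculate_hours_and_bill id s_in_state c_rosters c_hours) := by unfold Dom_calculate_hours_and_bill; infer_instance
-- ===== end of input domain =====

-- B inverts the traversal: it collects the set of enrolled courses, sums hours in one pass over
-- c_hours against that set, and bills once with hours * rate (objective: alternative).

-- ===== PORT A =====
def calculate_hours_and_bill (id : String) (s_in_state : List (String × Bool)) (c_rosters : List (String × List String)) (c_hours : List (String × Int)) : Int × Int :=
  -- the Python dict arguments, as Python dicts (last duplicate key wins)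
  let sd := PySem.Dict.ofList s_in_state
  let rd := PySem.Dict.ofList c_rosters
  let hd := PySem.Dict.ofList c_hours
  -- hours = 0; cost = 0; for course in c_rosters: …
  rd.items.foldl (fun (acc : Int × Int) p =>
    if id ∈ p.2 then
      -- c_hours[course]; KeyError (missing key) is excluded by Pre_
      let h := hd.getD p.1 0
      (acc.1 + h,
       if (sd.get? id).getD false = false then acc.2 + h * 850 else acc.2 + h * 225)
    else acc) (0, 0)

-- ===== PORT B =====
def calculate_hours_and_bill_alt (id : String) (s_in_state : List (String × Bool)) (c_rosters : List (String × List String)) (c_hours : List (String × Int)) : Int × Int :=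
  let rd := PySem.Dict.ofList c_rosters
  let hd := PySem.Dict.ofList c_hours
  -- enrolled = {course for course, roster in c_rosters.items() if id in roster}
  let enrolled := PySem.Set.ofList ((rd.items.filter (fun p => id ∈ p.2)).map (·.1))
  -- hours = 0; for course, h in c_hours.items(): if course in enrolled: hours += h
  let hours := hd.items.foldl (fun (acc : Int) p => if p.1 ∈ enrolled then acc + p.2 else acc) 0
  -- rate = 225 if s_in_state.get(id) else 850
  let rate : Int := if ((PySem.Dict.ofList s_in_state).get? id).getD false then 225 else 850
  (hours, hours * rate)

-- ===== PRECONDITION & SPEC =====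
-- Pre_ excludes exactly the inputs on which Python A raises KeyError: some course of the
-- c_rosters dict whose roster contains the student is missing from the c_hours dict.
def Pre_calculate_hours_and_bill (id : String) (s_in_state : List (String × Bool)) (c_rosters : List (String × List String)) (c_hours : List (String × Int)) : Prop :=
  ∀ p ∈ (PySem.Dict.ofList c_rosters).items, id ∈ p.2 → (PySem.Dict.ofList c_hours).contains p.1 = true
instance (id : String) (s_in_state : List (String × Bool)) (c_rosters : List (String × List String)) (c_hours : List (String × Int)) : Decidable (Pre_calculate_hours_and_bill id s_in_state c_rosters c_hours) := by unfold Pre_calculate_hours_and_bill; infer_instance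
def pvWitness_calculate_hours_and_bill : String × (List (String × Bool)) × (List (String × List String)) × (List (String × Int)) :=
  ("s1", [("s1", true)], [("c1", ["s1", "s2"]), ("c2", ["s2"])], [("c1", 3), ("c2", 4)])
def Spec_calculate_hours_and_bill (id : String) (s_in_state : List (String × Bool)) (c_rosters : List (String × List String)) (c_hours : List (String × Int)) (out : Int × Int) : Prop := out = calculate_hours_and_bill_alt id s_in_state c_rosters c_hours
instance (id : String) (s_in_state : List (String × Bool)) (c_rosters : List (String × List String)) (c_hours : List (String × Int)) (out : Int × Int) : Decidable (Spec_calculate_hours_and_bill id s_in_state c_rosters c_hours out) := by unfold Spec_calculate_hours_and_bill; infer_instance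

-- ===== CLAIM (what is proved, stated in full; the proofs are below) =====
def Claim_equal_calculate_hours_and_bill : Prop := ∀ (id : String) (s_in_state : List (String × Bool)) (c_rosters : List (String × List String)) (c_hours : List (String × Int)), Dom_calculate_hours_and_bill id s_in_state c_rosters c_hours → Pre_calculate_hours_and_bill id s_in_state c_rosters c_hours → Spec_calculate_hours_and_bill id s_in_state c_rosters c_hours (calculate_hours_and_bill id s_in_state c_rosters c_hours)

-- ===== LEMMAS AND PROOFS =====

-- A's loop with its two accumulators and in-loop branch on the loop-invariant boolean
-- b = bool(s_in_state.get(id)) equals (S, S * rate) for S the sum over matching courses.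
theorem pv_A_loop (id : String) (hd : PySem.Dict String Int) (b : Bool)
    (l : List (String × List String)) (acc : Int × Int) :
    l.foldl (fun (acc : Int × Int) p =>
      if id ∈ p.2 then
        let h := hd.getD p.1 0
        (acc.1 + h, if b = false then acc.2 + h * 850 else acc.2 + h * 225)
      else acc) acc
    = (acc.1 + ((l.filter (fun p => id ∈ p.2)).map (fun p => hd.getD p.1 0)).sum,
       acc.2 + ((l.filter (fun p => id ∈ p.2)).map (fun p => hd.getD p.1 0)).sum
                 * (if b then 225 else 850)) := by
  induction l generalizing acc with
  | nil => simp
  | cons p l ih =>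
    rw [List.foldl_cons, ih]
    by_cases hp : id ∈ p.2 <;> cases b <;> simp [hp, Prod.ext_iff] <;> constructor <;> ring

-- B's accumulator loop is the sum over the filtered list.
theorem pv_B_loop (E : PySem.Set String) (l : List (String × Int)) (acc : Int) :
    l.foldl (fun (acc : Int) p => if p.1 ∈ E then acc + p.2 else acc) acc
    = acc + ((l.filter (fun p => decide (p.1 ∈ E))).map (fun p => p.2)).sum := by
  induction l generalizing acc with
  | nil => simp
  | cons p l ih => by_cases hp : p.1 ∈ E <;> simp [hp, ih, add_assoc]

-- a sum over the keys of hd restricted to a nodup list E of keys of hd is the sum over E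
theorem pv_sum_perm (E K : List String) (f : String → Int)
    (hE : E.Nodup) (hK : K.Nodup) (hsub : ∀ k ∈ E, k ∈ K) :
    ((K.filter (fun k => decide (k ∈ E))).map f).sum = (E.map f).sum := by
  have hperm : (K.filter (fun k => decide (k ∈ E))).Perm E := by
    rw [List.perm_ext_iff_of_nodup (hK.filter _) hE]
    intro a
    simp only [List.mem_filter, decide_eq_true_eq]
    exact ⟨fun h => h.2, fun h => ⟨hsub a h, h⟩⟩
  exact (hperm.map f).sum_eq

-- the keys of the matching items of rd are nodup
theorem pv_enrolled_nodup (id : String) (rd : PySem.Dict String (List String))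
    (h : rd.keys.Nodup) : ((rd.items.filter (fun p => id ∈ p.2)).map (·.1)).Nodup := by
  simp only [PySem.Dict.keys] at h
  have hs : (rd.items.filter (fun p => decide (id ∈ p.2))).Sublist rd.items := List.filter_sublist
  exact (hs.map _).nodup h

-- ===== VERDICT (by name: the statement is the Claim_ definition above) =====
theorem calculate_hours_and_bill_spec : Claim_equal_calculate_hours_and_bill := by
  intro id s_in_state c_rosters c_hours _ hpre
  unfold Spec_calculate_hours_and_bill calculate_hours_and_bill calculate_hours_and_bill_alt
  simp only []
  set rd := PySem.Dict.ofList c_rosters with hrd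
  set hd := PySem.Dict.ofList c_hours with hhd
  set E := (rd.items.filter (fun p => id ∈ p.2)).map (·.1) with hE
  rw [pv_A_loop, pv_B_loop (PySem.Set.ofList E)]
  have hEnodup : E.Nodup := pv_enrolled_nodup id rd (PySem.Dict.nodup_keys_ofList c_rosters)
  have hKnodup : hd.keys.Nodup := PySem.Dict.nodup_keys_ofList c_hours
  have hitems : hd.items = hd.keys.map (fun k => (k, hd.getD k 0)) :=
    PySem.Dict.items_eq_map_keys hd hKnodup 0
  have hsum :
      ((hd.items.filter (fun p => decide (p.1 ∈ PySem.Set.ofList E))).map (·.2)).sum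
      = ((rd.items.filter (fun p => id ∈ p.2)).map (fun p => hd.getD p.1 0)).sum := by
    rw [hitems, List.filter_map, List.map_map]
    have hfe : ((fun p => decide (p.1 ∈ PySem.Set.ofList E)) ∘ fun k => (k, hd.getD k 0))
        = fun k => decide (k ∈ E) := by
      funext k; simp [PySem.Set.mem_ofList]
    rw [hfe]
    have : ((hd.keys.filter (fun k => decide (k ∈ E))).map
        ((fun p => p.2) ∘ fun k => (k, hd.getD k 0))).sum = (E.map (fun k => hd.getD k 0)).sum := by
      apply pv_sum_perm E hd.keys (fun k => hd.getD k 0) hEnodup hKnodup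
      intro k hk
      rw [hE] at hk
      simp only [List.mem_map, List.mem_filter] at hk
      obtain ⟨p, ⟨hpmem, hpid⟩, rfl⟩ := hk
      exact (PySem.Dict.contains_iff_mem_keys _ _).mp (hpre p hpmem (by simpa using hpid))
    rw [this, hE, List.map_map]
    rfl
  simp only [zero_add]
  rw [hsum]
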